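-- pv_equiv track=rewrite | github.com/ratorx/dotfiles | albert/scripts/search.py | fuzzy_match
-- ===== SOURCE A (Python) =====
-- def fuzzy_match(query, text):
--     i, j = 0, 0
--     while i != len(query) and j != len(text):
--         if query[i] == text[j]:
--             i += 1
--         j += 1
--
--     if i == len(query):
--         return j - i
--     else:
--         return -1
-- ===== SOURCE B (Python) =====
-- def fuzzy_match(query, text):
--     # Build a positional index: char -> sorted list of its positions in text.
--     index = {}
--     for pos, ch in enumerate(text):
--         index.setdefault(ch, []).append(pos)
--     nxt = 0
--     for ch in query:
--         occs = index.get(ch, [])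
--         # binary search: first position in occs that is >= nxt
--         lo, hi = 0, len(occs)
--         while lo < hi:
--             mid = (lo + hi) // 2
--             if occs[mid] < nxt:
--                 lo = mid + 1
--             else:
--                 hi = mid
--         if lo == len(occs):
--             return -1
--         nxt = occs[lo] + 1
--     return nxt - len(query)
-- ===== Notes on version B (the rewrite author's own statement) =====
-- stated objective: alternative
-- what changed: Replaces A's two-pointer scan over the text with a two-stage algorithm: one pass builds a char->positions index, then each query character is located by binary search over its position list.
import Mathlib
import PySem

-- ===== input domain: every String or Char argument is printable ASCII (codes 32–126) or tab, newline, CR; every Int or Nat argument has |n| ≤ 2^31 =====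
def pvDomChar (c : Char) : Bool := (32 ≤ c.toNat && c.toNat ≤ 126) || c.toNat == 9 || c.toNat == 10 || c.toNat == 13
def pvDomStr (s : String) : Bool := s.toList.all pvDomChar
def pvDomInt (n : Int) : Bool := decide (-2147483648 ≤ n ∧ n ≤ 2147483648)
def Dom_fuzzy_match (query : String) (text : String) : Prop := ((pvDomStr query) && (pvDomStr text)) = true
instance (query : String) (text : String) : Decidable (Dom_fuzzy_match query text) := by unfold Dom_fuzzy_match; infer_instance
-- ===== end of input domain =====

-- B replaces A's two-pointer scan of the text by a different algorithm: one pass builds a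
-- char -> positions index, then each query character is located by binary search (objective:
-- alternative; same return value).

-- ===== PORT A =====
-- A's while loop: indices i (into query) and j (into text); the loop runs while
-- i != len(query) and j != len(text); recursion is driven by the remaining text (= text from j on).
def fuzzyA_loop (q : List Char) (i j : Nat) : List Char → Nat × Nat
  | [] => (i, j)
  | c :: rest =>
      if i = q.length then (i, j)
      else fuzzyA_loop q (if q.getD i default = c then i + 1 else i) (j + 1) rest

def fuzzy_match (query : String) (text : String) : Int :=
  let p := fuzzyA_loop query.toList 0 0 text.toList
  if p.1 = query.toList.length then (p.2 : Int) - (p.1 : Int) else -1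

-- ===== PORT B =====
-- Source B's binary-search loop: while lo < hi: mid = (lo+hi)//2; ... (all values are nonnegative,
-- so Nat arithmetic is exact; occs[mid] is always in range since lo <= mid < hi <= len(occs),
-- so getD is exact there).
def bisectLoop (occs : List Nat) (nxt : Nat) (lo hi : Nat) : Nat :=
  if lo < hi then
    if occs.getD ((lo + hi) / 2) 0 < nxt then bisectLoop occs nxt ((lo + hi) / 2 + 1) hi
    else bisectLoop occs nxt lo ((lo + hi) / 2)
  else lo
termination_by hi - lo
decreasing_by all_goals omega

-- Source B's for-loop over the query: occs = index.get(ch, []); binary search; return -1 or recurse.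
def fuzzyB_go (idx : PySem.Dict Char (List Nat)) (qlen : Nat) : List Char → Nat → Int
  | [], nxt => (nxt : Int) - (qlen : Int)
  | c :: cs, nxt =>
      let occs := idx.getD c []
      let lo := bisectLoop occs nxt 0 occs.length
      if lo = occs.length then -1 else fuzzyB_go idx qlen cs (occs.getD lo 0 + 1)

-- Source B's index-building pass 'for pos, ch in enumerate(text): index.setdefault(ch, []).append(pos)';
-- zipIdx yields the same (char, position) pairs; setdefault+append is Dict.modify with default [].
def fuzzy_match_alt (query : String) (text : String) : Int :=
  let idx := (text.toList.zipIdx).foldl (fun d p => d.modify p.1 [] (· ++ [p.2])) PySem.Dict.empty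
  fuzzyB_go idx query.toList.length query.toList 0

-- ===== PRECONDITION & SPEC =====
def Spec_fuzzy_match (query : String) (text : String) (out : Int) : Prop := out = fuzzy_match_alt query text
instance (query : String) (text : String) (out : Int) : Decidable (Spec_fuzzy_match query text out) := by unfold Spec_fuzzy_match; infer_instance

-- ===== CLAIM (what is proved, stated in full; the proofs are below) =====
def Claim_equal_fuzzy_match : Prop := ∀ (query : String) (text : String), Dom_fuzzy_match query text → Spec_fuzzy_match query text (fuzzy_match query text)

-- ===== LEMMAS AND PROOFS =====

-- the positions of c in l, numbering the head as k (reference list both ports are related to)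
def occsFrom (c : Char) : List Char → Nat → List Nat
  | [], _ => []
  | x :: xs, k => if x = c then k :: occsFrom c xs (k + 1) else occsFrom c xs (k + 1)

-- the common greedy recursion both ports are proved equal to
def gLoop (text : List Char) (qlen : Nat) : List Char → Nat → Int
  | [], pos => (pos : Int) - (qlen : Int)
  | c :: cs, pos =>
      match (occsFrom c (text.drop pos) pos).head? with
      | none => -1
      | some k => gLoop text qlen cs (k + 1)

lemma occs_zipIdx (c : Char) : ∀ (l : List Char) (k : Nat),
    ((l.zipIdx k).filter (fun p => p.1 == c)).map (·.2) = occsFrom c l k := by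
  intro l
  induction l with
  | nil => intro k; simp [occsFrom]
  | cons x xs ih =>
      intro k
      by_cases h : x = c <;> simp [occsFrom, h, ih]

lemma occs_lb (c : Char) : ∀ (l : List Char) (k m : Nat), m ∈ occsFrom c l k → k ≤ m := by
  intro l
  induction l with
  | nil => intro k m h; simp [occsFrom] at h
  | cons x xs ih =>
      intro k m h
      by_cases hx : x = c
      · simp [occsFrom, hx] at h
        rcases h with h | h
        · omega
        · have := ih (k + 1) m h; omega
      · simp [occsFrom, hx] at h
        have := ih (k + 1) m h; omega

lemma occs_pairwise (c : Char) : ∀ (l : List Char) (k : Nat),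
    (occsFrom c l k).Pairwise (· < ·) := by
  intro l
  induction l with
  | nil => intro k; simp [occsFrom]
  | cons x xs ih =>
      intro k
      by_cases hx : x = c
      · simp only [occsFrom, if_pos hx]
        refine List.pairwise_cons.2 ⟨?_, ih (k + 1)⟩
        intro m hm
        have := occs_lb c xs (k + 1) m hm; omega
      · simpa [occsFrom, hx] using ih (k + 1)

lemma occs_filter_drop (c : Char) : ∀ (l : List Char) (j k : Nat),
    (occsFrom c l k).filter (fun m => decide (k + j ≤ m)) = occsFrom c (l.drop j) (k + j) := by
  intro l
  induction l with
  | nil => intro j k; simp [occsFrom]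
  | cons x xs ih =>
      intro j k
      cases j with
      | zero =>
          simp only [Nat.add_zero, List.drop_zero]
          apply List.filter_eq_self.2
          intro m hm
          simpa using occs_lb c (x :: xs) k m hm
      | succ j' =>
          have hk : ¬ (k + (j' + 1) ≤ k) := by omega
          have he : k + (j' + 1) = (k + 1) + j' := by omega
          by_cases hx : x = c
          · simp only [occsFrom, if_pos hx, List.filter_cons, decide_eq_true_eq, hk,
              List.drop_succ_cons]
            rw [he, ih j' (k + 1)]; simp
          · simp only [occsFrom, if_neg hx, List.drop_succ_cons]
            rw [he, ih j' (k + 1)]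

lemma occs_mono (l : List Nat) (hs : l.Pairwise (· < ·)) (i j : Nat)
    (hij : i ≤ j) (hj : j < l.length) : l.getD i 0 ≤ l.getD j 0 := by
  rcases Nat.lt_or_ge i j with h | h
  · have := (List.pairwise_iff_getElem.1 hs) i j (by omega) hj h
    rw [List.getD_eq_getElem l 0 (by omega), List.getD_eq_getElem l 0 hj]
    omega
  · have hij' : i = j := by omega
    subst hij'; exact le_refl _

lemma bisect_boundary (occs : List Nat) (hs : occs.Pairwise (· < ·)) (nxt : Nat) :
    ∀ lo hi, lo ≤ hi → hi ≤ occs.length →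
      (∀ i, i < lo → occs.getD i 0 < nxt) →
      (∀ i, hi ≤ i → i < occs.length → nxt ≤ occs.getD i 0) →
      (bisectLoop occs nxt lo hi ≤ occs.length ∧
       (∀ i, i < bisectLoop occs nxt lo hi → occs.getD i 0 < nxt) ∧
       (∀ i, bisectLoop occs nxt lo hi ≤ i → i < occs.length → nxt ≤ occs.getD i 0)) := by
  intro lo hi
  fun_induction bisectLoop occs nxt lo hi with
  | case1 lo hi hlt hmid ih =>
      intro hle hhi hlow hhigh
      refine ih (by omega) hhi ?_ hhigh
      intro i hi'
      calc occs.getD i 0 ≤ occs.getD ((lo + hi) / 2) 0 :=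
            occs_mono occs hs i _ (by omega) (by omega)
        _ < nxt := hmid
  | case2 lo hi hlt hmid ih =>
      intro hle hhi hlow hhigh
      refine ih (by omega) (by omega) hlow ?_
      intro i hi' hilen
      calc nxt ≤ occs.getD ((lo + hi) / 2) 0 := by omega
        _ ≤ occs.getD i 0 := occs_mono occs hs _ i (by omega) hilen
  | case3 lo hi hlt =>
      intro hle hhi hlow hhigh
      refine ⟨by omega, hlow, ?_⟩
      intro i hi' hilen
      exact hhigh i (by omega) hilen

lemma head?_filter_boundary (p : Nat → Bool) : ∀ (l : List Nat) (r : Nat),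
    r < l.length → (∀ i, i < r → p (l.getD i 0) = false) → p (l.getD r 0) = true →
    (l.filter p).head? = some (l.getD r 0) := by
  intro l
  induction l with
  | nil => intro r hr; simp at hr
  | cons x xs ih =>
      intro r hr hlt hp
      cases r with
      | zero =>
          simp only [List.getD_cons_zero] at hp
          simp [hp]
      | succ r' =>
          have hx : p x = false := by
            have := hlt 0 (by omega); simpa using this
          simp only [List.filter_cons, hx, Bool.false_eq_true]
          simp only [List.getD_cons_succ] at hp ⊢
          exact ih r' (by simpa using hr) (fun i hi => by simpa using hlt (i + 1) (by omega)) hp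

lemma filter_eq_nil_of_lt (l : List Nat) (nxt : Nat)
    (h : ∀ i, i < l.length → l.getD i 0 < nxt) :
    l.filter (fun m => decide (nxt ≤ m)) = [] := by
  apply List.filter_eq_nil_iff.2
  intro a ha
  rcases List.mem_iff_getElem.1 ha with ⟨i, hi, rfl⟩
  have := h i hi
  rw [List.getD_eq_getElem l 0 hi] at this
  simpa using Nat.not_le.2 this

-- B's per-character step computes exactly gLoop's next-occurrence lookup
lemma B_step (text : List Char) (c : Char) (pos : Nat) :
    (bisectLoop (occsFrom c text 0) pos 0 (occsFrom c text 0).length = (occsFrom c text 0).length →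
      (occsFrom c (text.drop pos) pos).head? = none) ∧
    (bisectLoop (occsFrom c text 0) pos 0 (occsFrom c text 0).length < (occsFrom c text 0).length →
      (occsFrom c (text.drop pos) pos).head? =
        some ((occsFrom c text 0).getD (bisectLoop (occsFrom c text 0) pos 0 (occsFrom c text 0).length) 0)) := by
  have hs := occs_pairwise c text 0
  have hfd := occs_filter_drop c text pos 0
  simp only [Nat.zero_add] at hfd
  obtain ⟨hlen, hlow, hhigh⟩ :=
    bisect_boundary (occsFrom c text 0) hs pos 0 (occsFrom c text 0).length
      (by omega) (le_refl _) (by omega) (by omega)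
  constructor
  · intro heq
    rw [← hfd, filter_eq_nil_of_lt _ pos (fun i hi => hlow i (by omega))]
    rfl
  · intro hltl
    rw [← hfd]
    exact head?_filter_boundary (fun m => decide (pos ≤ m)) (occsFrom c text 0) _ hltl
      (fun i hi => by simpa using Nat.not_le.2 (hlow i hi))
      (by simpa using hhigh _ (le_refl _) hltl)

lemma idx_getD (text : List Char) (c : Char) :
    ((text.zipIdx).foldl (fun d p => d.modify p.1 [] (· ++ [p.2])) PySem.Dict.empty).getD c []
      = occsFrom c text 0 := by
  rw [PySem.Dict.getD_foldl_modify_append]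
  rw [PySem.Dict.getD_empty]
  simpa using occs_zipIdx c text 0

lemma B_eq_g (text : List Char) (qlen : Nat) (idx : PySem.Dict Char (List Nat))
    (hidx : ∀ c, idx.getD c [] = occsFrom c text 0) :
    ∀ (qs : List Char) (pos : Nat), fuzzyB_go idx qlen qs pos = gLoop text qlen qs pos := by
  intro qs
  induction qs with
  | nil => intro pos; rfl
  | cons c cs ih =>
      intro pos
      simp only [fuzzyB_go, gLoop, hidx c]
      obtain ⟨h1, h2⟩ := B_step text c pos
      by_cases heq : bisectLoop (occsFrom c text 0) pos 0 (occsFrom c text 0).length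
          = (occsFrom c text 0).length
      · rw [if_pos heq, h1 heq]
      · have hlt : bisectLoop (occsFrom c text 0) pos 0 (occsFrom c text 0).length
            < (occsFrom c text 0).length := by
          obtain ⟨hlen, _, _⟩ :=
            bisect_boundary (occsFrom c text 0) (occs_pairwise c text 0) pos 0
              (occsFrom c text 0).length (by omega) (le_refl _) (by omega) (by omega)
          omega
        rw [if_neg heq, h2 hlt]
        exact ih _

-- the main invariant for A: at indices i (into query) / j (into text), A's loop result
-- (turned into the final return value) equals gLoop on the remaining query
lemma A_inv (text : String) (q : List Char) :
    ∀ (rest qs : List Char) (i j : Nat),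
      q.drop i = qs → text.toList.drop j = rest → i ≤ q.length → j ≤ text.toList.length →
      (if (fuzzyA_loop q i j rest).1 = q.length
        then ((fuzzyA_loop q i j rest).2 : Int) - ((fuzzyA_loop q i j rest).1 : Int)
        else -1)
      = gLoop text.toList q.length qs j := by
  intro rest
  induction rest with
  | nil =>
      intro qs i j hqi htj hi hj
      cases qs with
      | nil =>
          have hlen : q.length ≤ i := List.drop_eq_nil_iff.1 hqi
          have hieq : i = q.length := le_antisymm hi hlen
          simp [fuzzyA_loop, gLoop, hieq]
      | cons c₀ qs' =>
          have hilt : i < q.length := by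
            by_contra h
            rw [List.drop_eq_nil_of_le (by omega)] at hqi; simp at hqi
          simp only [fuzzyA_loop, gLoop, htj]
          simp [occsFrom, hilt.ne]
  | cons c rest' ih =>
      intro qs i j hqi htj hi hj
      have hjlt : j < text.toList.length := by
        by_contra h
        rw [List.drop_eq_nil_of_le (by omega)] at htj; simp at htj
      have htj' : text.toList.drop (j + 1) = rest' := by
        have h2 : text.toList.drop (j + 1) = (text.toList.drop j).drop 1 := by
          rw [List.drop_drop]
        rw [h2, htj]; rfl
      cases qs with
      | nil =>
          have hlen : q.length ≤ i := List.drop_eq_nil_iff.1 hqi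
          have hieq : i = q.length := le_antisymm hi hlen
          simp [fuzzyA_loop, gLoop, hieq]
      | cons c₀ qs' =>
          have hilt : i < q.length := by
            by_contra h
            rw [List.drop_eq_nil_of_le (by omega)] at hqi; simp at hqi
          have hgd : q.getD i default = c₀ := by
            have h1 : q[i]? = some c₀ := by
              rw [← List.head?_drop, hqi]; rfl
            simp [List.getD, h1]
          simp only [fuzzyA_loop, hgd, if_neg hilt.ne]
          by_cases hc : c₀ = c
          · subst hc
            have hqi' : q.drop (i + 1) = qs' := by
              have h2 : q.drop (i + 1) = (q.drop i).drop 1 := by rw [List.drop_drop]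
              rw [h2, hqi]; rfl
            rw [if_pos rfl]
            have hih := ih qs' (i + 1) (j + 1) hqi' htj' (by omega) (by omega)
            rw [hih]
            simp [gLoop, htj, occsFrom]
          · rw [if_neg hc]
            have hih := ih (c₀ :: qs') i (j + 1) hqi htj' hi (by omega)
            rw [hih]
            simp only [gLoop, htj, htj', occsFrom, if_neg (fun h : c = c₀ => hc h.symm)]

-- ===== VERDICT (by name: the statement is the Claim_ definition above) =====
theorem fuzzy_match_spec : Claim_equal_fuzzy_match := by
  intro query text _
  unfold Spec_fuzzy_match fuzzy_match fuzzy_match_alt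
  rw [B_eq_g text.toList query.toList.length _ (fun c => idx_getD text.toList c) query.toList 0]
  have := A_inv text query.toList text.toList query.toList 0 0 rfl rfl (by omega) (by omega)
  simpa using this
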